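-- pv_equiv track=rewrite | github.com/lsdudnik/home | поляков_3/4.py | fano
-- ===== SOURCE A (Python) =====
-- data = {'11', '0011', '101', '100', '0010', '0101', '0001', '0000', '011'}
--
-- def fano(x, have):
-- 	for item in data:
-- 		if len(x) < len(item):
-- 			if item.startswith(x):
-- 				return False
-- 		elif len(x) >= len(item):
-- 			if x.startswith(item):
-- 				return False
-- 	return True
-- ===== SOURCE B (Python) =====
-- data = {'11', '0011', '101', '100', '0010', '0101', '0001', '0000', '011'}
--
-- def _trie_insert(node, word):
-- 	# node = [is_end, child_for_'0', child_for_'1']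
-- 	if not word:
-- 		node[0] = True
-- 		return
-- 	i = 1 if word[0] == '0' else 2
-- 	if node[i] is None:
-- 		node[i] = [False, None, None]
-- 	_trie_insert(node[i], word[1:])
--
-- def _build_trie():
-- 	root = [False, None, None]
-- 	for w in sorted(data):
-- 		_trie_insert(root, w)
-- 	return root
--
-- _TRIE = _build_trie()
--
-- def fano(x, have):
-- 	node = _TRIE
-- 	for ch in x:
-- 		if node[0]:
-- 			return False  # a codeword is a proper prefix of x
-- 		if ch == '0':
-- 			node = node[1]
-- 		elif ch == '1':
-- 			node = node[2]
-- 		else: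
-- 			node = None
-- 		if node is None:
-- 			return True  # x diverges from every codeword
-- 	return False  # x lies on a codeword path (prefix of, or equal to, a codeword)
-- ===== Notes on version B (the rewrite author's own statement) =====
-- stated objective: idiomatic
-- what changed: B builds a binary prefix trie from the fixed codeword set once and decides by a single character-driven descent of x, instead of A's per-codeword two-way startswith scan.
import Mathlib
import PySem

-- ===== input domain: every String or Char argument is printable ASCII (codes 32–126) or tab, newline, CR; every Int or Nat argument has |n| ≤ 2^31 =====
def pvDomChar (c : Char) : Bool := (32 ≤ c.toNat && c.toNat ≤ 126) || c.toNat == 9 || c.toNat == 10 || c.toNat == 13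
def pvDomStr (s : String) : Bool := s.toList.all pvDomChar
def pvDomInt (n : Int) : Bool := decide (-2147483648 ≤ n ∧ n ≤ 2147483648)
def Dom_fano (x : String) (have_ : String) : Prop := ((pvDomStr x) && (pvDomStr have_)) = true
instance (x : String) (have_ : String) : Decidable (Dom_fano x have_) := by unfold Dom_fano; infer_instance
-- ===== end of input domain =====

-- B replaces A's per-codeword two-way startswith scan by a single descent of a binary
-- prefix trie built once from the fixed codeword set (objective: alternative/idiomatic).

-- ===== PORT A =====
-- the module constant `data` (a Python set of the 9 codewords, as lists of chars)
def fanoData : List (List Char) :=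
  PySem.Set.ofList [['1','1'], ['0','0','1','1'], ['1','0','1'], ['1','0','0'],
    ['0','0','1','0'], ['0','1','0','1'], ['0','0','0','1'], ['0','0','0','0'], ['0','1','1']]

-- A's `for item in data` loop with its early returns (the result is iteration-order
-- independent: it is False iff SOME item passes a startswith test, True otherwise)
def fanoLoop : List (List Char) → List Char → Bool
  | [], _ => true
  | item :: rest, x =>
    if x.length < item.length then
      if PySem.Chars.startswith item x then false else fanoLoop rest x
    else if x.length ≥ item.length then
      if PySem.Chars.startswith x item then false else fanoLoop rest x
    else fanoLoop rest x

def fano (x : String) (have_ : String) : Bool := fanoLoop fanoData x.toList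

-- ===== PORT B =====
-- Source B's trie node [is_end, child0, child1]; Python's None child is `nil`
inductive Trie where
  | nil : Trie
  | node : Bool → Trie → Trie → Trie
deriving DecidableEq, Repr

-- Source B's _trie_insert (codewords are over '0'/'1' only, as in Source B)
def Trie.insert : Trie → List Char → Trie
  | t, [] =>
    match t with
    | .nil => .node true .nil .nil
    | .node _ a b => .node true a b
  | t, c :: cs =>
    match t with
    | .nil =>
      if c = '0' then .node false (Trie.insert .nil cs) .nil
      else .node false .nil (Trie.insert .nil cs)
    | .node e a b =>
      if c = '0' then .node e (Trie.insert a cs) b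
      else .node e a (Trie.insert b cs)

-- Source B's _build_trie: fold insert over sorted(data)
def fanoTrie : Trie :=
  (PySem.List.sorted fanoData (fun w => w) false).foldl Trie.insert (.node false .nil .nil)

-- Source B's character-driven descent loop
def fanoWalk : Trie → List Char → Bool
  | _, [] => false
  | .nil, _ :: _ => true          -- unreachable from the root (node is never None at loop head)
  | .node e a b, c :: cs =>
    if e then false
    else
      match (if c = '0' then a else if c = '1' then b else .nil) with
      | .nil => true
      | .node e' a' b' => fanoWalk (.node e' a' b') cs

def fano_alt (x : String) (have_ : String) : Bool := fanoWalk fanoTrie x.toList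

-- ===== PRECONDITION & SPEC =====
def Spec_fano (x : String) (have_ : String) (out : Bool) : Prop := out = fano_alt x have_
instance (x : String) (have_ : String) (out : Bool) : Decidable (Spec_fano x have_ out) := by unfold Spec_fano; infer_instance

-- ===== CLAIM (what is proved, stated in full; the proofs are below) =====
def Claim_equal_fano : Prop := ∀ (x : String) (have_ : String), Dom_fano x have_ → Spec_fano x have_ (fano x have_)

-- ===== LEMMAS AND PROOFS =====
def L (e : Bool) : Trie := .node e .nil .nil

-- the literal value of the built trie
def trieLit : Trie :=
  .node false
    (.node false
      (.node false
        (.node false (L true) (L true))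
        (.node false (L true) (L true)))
      (.node false
        (.node false .nil (L true))
        (L true)))
    (.node false
      (.node false (L true) (L true))
      (L true))

lemma fanoTrie_eq : fanoTrie = trieLit := by decide

lemma fanoData_eq : fanoData = [['1','1'], ['0','0','1','1'], ['1','0','1'], ['1','0','0'],
    ['0','0','1','0'], ['0','1','0','1'], ['0','0','0','1'], ['0','0','0','0'], ['0','1','1']] := by decide

lemma walk_true (a b : Trie) (cs : List Char) : fanoWalk (.node true a b) cs = false := by
  cases cs <;> simp [fanoWalk]

lemma key (l : List Char) : fanoLoop fanoData l = fanoWalk trieLit l := by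
  cases l with
  | nil => decide
  | cons a l =>
    by_cases ha0 : a = '0'
    · subst ha0
      cases l with
      | nil => decide
      | cons b l =>
        by_cases hb0 : b = '0'
        · subst hb0
          cases l with
          | nil => decide
          | cons c l =>
            by_cases hc0 : c = '0'
            · subst hc0  -- node 000: both children are codeword ends
              cases l with
              | nil => decide
              | cons d l =>
                by_cases hd0 : d = '0'
                · subst hd0
                  simp [fanoLoop, fanoData_eq, fanoWalk, trieLit, L, PySem.Chars.startswith,
                        List.isPrefixOf, walk_true]
                · by_cases hd1 : d = '1'
                  · subst hd1
                    simp [fanoLoop, fanoData_eq, fanoWalk, trieLit, L, PySem.Chars.startswith,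
                          List.isPrefixOf, walk_true]
                  · have h0 : ¬ ('0' = d) := fun h => hd0 h.symm
                    have h1 : ¬ ('1' = d) := fun h => hd1 h.symm
                    simp [fanoLoop, fanoData_eq, fanoWalk, trieLit, L, PySem.Chars.startswith,
                          List.isPrefixOf, hd0, hd1, h0, h1]
            · by_cases hc1 : c = '1'
              · subst hc1  -- node 001: both children are codeword ends
                cases l with
                | nil => decide
                | cons d l =>
                  by_cases hd0 : d = '0'
                  · subst hd0
                    simp [fanoLoop, fanoData_eq, fanoWalk, trieLit, L, PySem.Chars.startswith,
                          List.isPrefixOf, walk_true]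
                  · by_cases hd1 : d = '1'
                    · subst hd1
                      simp [fanoLoop, fanoData_eq, fanoWalk, trieLit, L, PySem.Chars.startswith,
                            List.isPrefixOf, walk_true]
                    · have h0 : ¬ ('0' = d) := fun h => hd0 h.symm
                      have h1 : ¬ ('1' = d) := fun h => hd1 h.symm
                      simp [fanoLoop, fanoData_eq, fanoWalk, trieLit, L, PySem.Chars.startswith,
                            List.isPrefixOf, hd0, hd1, h0, h1]
              · have h0 : ¬ ('0' = c) := fun h => hc0 h.symm
                have h1 : ¬ ('1' = c) := fun h => hc1 h.symm
                simp [fanoLoop, fanoData_eq, fanoWalk, trieLit, L, PySem.Chars.startswith,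
                      List.isPrefixOf, hc0, hc1, h0, h1]
        · by_cases hb1 : b = '1'
          · subst hb1
            cases l with
            | nil => decide
            | cons c l =>
              by_cases hc0 : c = '0'
              · subst hc0  -- node 010: '0' child is nil, '1' child is codeword end 0101
                cases l with
                | nil => decide
                | cons d l =>
                  by_cases hd0 : d = '0'
                  · subst hd0  -- path 0100: no codeword relates
                    simp [fanoLoop, fanoData_eq, fanoWalk, trieLit, L, PySem.Chars.startswith,
                          List.isPrefixOf]
                  · by_cases hd1 : d = '1'
                    · subst hd1
                      simp [fanoLoop, fanoData_eq, fanoWalk, trieLit, L, PySem.Chars.startswith,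
                            List.isPrefixOf, walk_true]
                    · have h0 : ¬ ('0' = d) := fun h => hd0 h.symm
                      have h1 : ¬ ('1' = d) := fun h => hd1 h.symm
                      simp [fanoLoop, fanoData_eq, fanoWalk, trieLit, L, PySem.Chars.startswith,
                            List.isPrefixOf, hd0, hd1, h0, h1]
              · by_cases hc1 : c = '1'
                · subst hc1  -- 011 is a codeword
                  simp [fanoLoop, fanoData_eq, fanoWalk, trieLit, L, PySem.Chars.startswith,
                        List.isPrefixOf, walk_true]
                · have h0 : ¬ ('0' = c) := fun h => hc0 h.symm
                  have h1 : ¬ ('1' = c) := fun h => hc1 h.symm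
                  simp [fanoLoop, fanoData_eq, fanoWalk, trieLit, L, PySem.Chars.startswith,
                        List.isPrefixOf, hc0, hc1, h0, h1]
          · have h0 : ¬ ('0' = b) := fun h => hb0 h.symm
            have h1 : ¬ ('1' = b) := fun h => hb1 h.symm
            simp [fanoLoop, fanoData_eq, fanoWalk, trieLit, L, PySem.Chars.startswith,
                  List.isPrefixOf, hb0, hb1, h0, h1]
    · by_cases ha1 : a = '1'
      · subst ha1
        cases l with
        | nil => decide
        | cons b l =>
          by_cases hb0 : b = '0'
          · subst hb0  -- node 10: both children are codeword ends
            cases l with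
            | nil => decide
            | cons c l =>
              by_cases hc0 : c = '0'
              · subst hc0
                simp [fanoLoop, fanoData_eq, fanoWalk, trieLit, L, PySem.Chars.startswith,
                      List.isPrefixOf, walk_true]
              · by_cases hc1 : c = '1'
                · subst hc1
                  simp [fanoLoop, fanoData_eq, fanoWalk, trieLit, L, PySem.Chars.startswith,
                        List.isPrefixOf, walk_true]
                · have h0 : ¬ ('0' = c) := fun h => hc0 h.symm
                  have h1 : ¬ ('1' = c) := fun h => hc1 h.symm
                  simp [fanoLoop, fanoData_eq, fanoWalk, trieLit, L, PySem.Chars.startswith,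
                        List.isPrefixOf, hc0, hc1, h0, h1]
          · by_cases hb1 : b = '1'
            · subst hb1  -- 11 is a codeword
              simp [fanoLoop, fanoData_eq, fanoWalk, trieLit, L, PySem.Chars.startswith,
                    List.isPrefixOf, walk_true]
            · have h0 : ¬ ('0' = b) := fun h => hb0 h.symm
              have h1 : ¬ ('1' = b) := fun h => hb1 h.symm
              simp [fanoLoop, fanoData_eq, fanoWalk, trieLit, L, PySem.Chars.startswith,
                    List.isPrefixOf, hb0, hb1, h0, h1]
      · have h0 : ¬ ('0' = a) := fun h => ha0 h.symm
        have h1 : ¬ ('1' = a) := fun h => ha1 h.symm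
        simp [fanoLoop, fanoData_eq, fanoWalk, trieLit, L, PySem.Chars.startswith,
              List.isPrefixOf, ha0, ha1, h0, h1]

-- ===== VERDICT (by name: the statement is the Claim_ definition above) =====
theorem fano_spec : Claim_equal_fano := by
  intro x have_ _
  unfold Spec_fano fano fano_alt
  rw [fanoTrie_eq]
  exact key x.toList
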